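-- pv_equiv track=rewrite | github.com/hon9kon9ize/infinite-rl | emulator/advanced_scenarios.py | cascade_success
-- ===== SOURCE A (Python) =====
-- from typing import List, Tuple, Dict, Any, Callable
--
-- class ResponsePattern:
--     """Predefined response patterns for common scenarios."""
--
--     @staticmethod
--     def perfect() -> Tuple[bool, bool, bool]:
--         """Perfect response: think + answer + correct."""
--         return (True, True, True)
--
--     @staticmethod
--     def format_only() -> Tuple[bool, bool, bool]:
--         """Proper format but incorrect answer."""
--         return (True, True, False)
--
--     @staticmethod
--     def no_think() -> Tuple[bool, bool, bool]:
--         """Missing think tag."""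
--         return (False, True, True)
--
--     @staticmethod
--     def no_answer() -> Tuple[bool, bool, bool]:
--         """Missing answer tag."""
--         return (True, False, True)
--
--     @staticmethod
--     def incomplete_format() -> Tuple[bool, bool, bool]:
--         """Missing both tags."""
--         return (False, False, True)
--
--     @staticmethod
--     def all_bad() -> Tuple[bool, bool, bool]:
--         """Missing format AND wrong answer."""
--         return (False, False, False)
--
--     @staticmethod
--     def think_only() -> Tuple[bool, bool, bool]:
--         """Only think tag present."""
--         return (True, False, False)
--
--     @staticmethod
--     def answer_only() -> Tuple[bool, bool, bool]:
--         """Only answer tag present."""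
--         return (False, True, False)
--
-- def cascade_success(
--     num_steps: int = 100,
-- ) -> List[Tuple[bool, bool, bool]]:
--     """Demonstrate cascading effect: success breeds more success.
--
--     As model improves at lower levels, it naturally progresses.
--     """
--     pattern = []
--
--     # Level 0: Quick mastery
--     for _ in range(15):
--         pattern.append(
--             ResponsePattern.perfect() if _ > 5 else ResponsePattern.format_only()
--         )
--
--     # Level 1: Gets harder, takes longer
--     for _ in range(25):
--         if _ < 10:
--             pattern.append(
--                 ResponsePattern.format_only()
--                 if _ % 2 == 0
--                 else ResponsePattern.perfect()
--             )
--         else: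
--             pattern.append(ResponsePattern.perfect())
--
--     # Level 2: Even harder
--     for _ in range(30):
--         pattern.append(
--             ResponsePattern.perfect() if _ > 15 else ResponsePattern.format_only()
--         )
--
--     # Continued success at higher levels
--     for _ in range(30):
--         pattern.append(ResponsePattern.perfect())
--
--     return pattern[:num_steps]
-- ===== SOURCE B (Python) =====
-- def cascade_success(num_steps=100):
--     def format_only_at(i):
--         # level thresholds: 0..14 level 0, 15..39 level 1, 40..69 level 2, 70..99 higher
--         if i < 15:
--             return i <= 5
--         if i < 40:
--             j = i - 15
--             return j < 10 and j % 2 == 0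
--         if i < 70:
--             return i - 40 <= 15
--         return False
--     return [(True, True, not format_only_at(i)) for i in range(100)][:num_steps]
-- ===== Notes on version B (the rewrite author's own statement) =====
-- stated objective: simpler
-- what changed: Replaces the four appending loops with one comprehension over range(100) computing the correctness flag from an index predicate over the level thresholds, then slices.
import Mathlib
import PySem

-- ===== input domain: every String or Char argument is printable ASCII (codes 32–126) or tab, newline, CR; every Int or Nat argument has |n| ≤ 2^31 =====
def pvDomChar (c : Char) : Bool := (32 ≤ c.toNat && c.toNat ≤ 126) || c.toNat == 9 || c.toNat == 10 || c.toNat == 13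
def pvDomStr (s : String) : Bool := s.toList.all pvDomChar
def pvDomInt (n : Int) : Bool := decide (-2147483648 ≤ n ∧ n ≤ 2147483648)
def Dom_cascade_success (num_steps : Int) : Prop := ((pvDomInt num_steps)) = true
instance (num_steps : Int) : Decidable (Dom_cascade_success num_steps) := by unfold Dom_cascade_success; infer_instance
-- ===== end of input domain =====

-- B replaces A's four appending loops with one comprehension over range(100) computing the
-- correctness flag from an index predicate, then slicing: simpler, same cost.


-- ===== PORT A =====
def pvPerfect : Bool × Bool × Bool := (true, true, true)
def pvFormatOnly : Bool × Bool × Bool := (true, true, false)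

def cascade_success (num_steps : Int) : List (Bool × Bool × Bool) :=
  let pattern : List (Bool × Bool × Bool) := []
  -- Level 0
  let pattern := (PySem.List.pyRange 0 15 1).foldl (fun acc i =>
    acc ++ [if i > 5 then pvPerfect else pvFormatOnly]) pattern
  -- Level 1
  let pattern := (PySem.List.pyRange 0 25 1).foldl (fun acc i =>
    if i < 10 then
      acc ++ [if PySem.Int.mod i 2 == 0 then pvFormatOnly else pvPerfect]
    else
      acc ++ [pvPerfect]) pattern
  -- Level 2
  let pattern := (PySem.List.pyRange 0 30 1).foldl (fun acc i =>
    acc ++ [if i > 15 then pvPerfect else pvFormatOnly]) pattern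
  -- Continued success
  let pattern := (PySem.List.pyRange 0 30 1).foldl (fun acc _ =>
    acc ++ [pvPerfect]) pattern
  PySem.List.slice pattern none (some num_steps)

-- ===== PORT B =====
def format_only_at (i : Int) : Bool :=
  if i < 15 then i ≤ 5
  else if i < 40 then decide (i - 15 < 10) && (PySem.Int.mod (i - 15) 2 == 0)
  else if i < 70 then i - 40 ≤ 15
  else false

def cascade_success_alt (num_steps : Int) : List (Bool × Bool × Bool) :=
  PySem.List.slice
    ((PySem.List.pyRange 0 100 1).map (fun i => (true, true, !format_only_at i)))
    none (some num_steps)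

-- ===== PRECONDITION & SPEC =====
def Spec_cascade_success (num_steps : Int) (out : List (Bool × Bool × Bool)) : Prop := out = cascade_success_alt num_steps
instance (num_steps : Int) (out : List (Bool × Bool × Bool)) : Decidable (Spec_cascade_success num_steps out) := by unfold Spec_cascade_success; infer_instance

-- ===== CLAIM (what is proved, stated in full; the proofs are below) =====
def Claim_equal_cascade_success : Prop := ∀ (num_steps : Int), Dom_cascade_success num_steps → Spec_cascade_success num_steps (cascade_success num_steps)

-- ===== LEMMAS AND PROOFS =====
-- the two 100-element lists built before slicing coincide (a closed computation)
set_option maxRecDepth 4000 in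
theorem pv_lists_eq :
    ((PySem.List.pyRange 0 15 1).foldl (fun acc i =>
        acc ++ [if i > 5 then pvPerfect else pvFormatOnly]) ([] : List (Bool × Bool × Bool))
      |> fun p => (PySem.List.pyRange 0 25 1).foldl (fun acc i =>
        if i < 10 then acc ++ [if PySem.Int.mod i 2 == 0 then pvFormatOnly else pvPerfect]
        else acc ++ [pvPerfect]) p
      |> fun p => (PySem.List.pyRange 0 30 1).foldl (fun acc i =>
        acc ++ [if i > 15 then pvPerfect else pvFormatOnly]) p
      |> fun p => (PySem.List.pyRange 0 30 1).foldl (fun acc _ =>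
        acc ++ [pvPerfect]) p)
    = (PySem.List.pyRange 0 100 1).map (fun i => (true, true, !format_only_at i)) := by
  decide

-- ===== VERDICT (by name: the statement is the Claim_ definition above) =====
theorem cascade_success_spec : Claim_equal_cascade_success := by
  intro n _
  unfold Spec_cascade_success cascade_success cascade_success_alt
  rw [← pv_lists_eq]
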